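-- pv_equiv track=rewrite | github.com/MohammadWasil/Flappy-Bird-with-Qlearning-and-SARSA | Smart Cab RL/Smart Cab Q-Learning REWARD=0/smart_cab_adapted.py | coordinate
-- ===== SOURCE A (Python) =====
-- LINE_SPACING = 92
--
-- def coordinate(I, J):
--     """
--     Input coordinates. Output states.
--     """
--     cumulative_linespacing_Y = 0
--     cumulative_linespacing_X = 0
--     for i in range(1, 6):
--         cumulative_linespacing_Y += LINE_SPACING
--         if (i-1 == I):
--
--             # here, 26 is hardoded number
--             # Changes the position Left or Right.
--             y = (cumulative_linespacing_Y)-26#+(LINE_SPACING*(i-1))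
--             for j in range(1, 6):
--                 cumulative_linespacing_X += LINE_SPACING
--                 if (j-1 == J):
--                     x = (cumulative_linespacing_X)-26#+(LINE_SPACING*(i-1))
--                     return x, y
-- ===== SOURCE B (Python) =====
-- LINE_SPACING = 92
--
-- def coordinate(I, J):
--     """
--     Input coordinates. Output states.
--     """
--     if 0 <= I <= 4 and 0 <= J <= 4:
--         return ((J + 1) * LINE_SPACING - 26, (I + 1) * LINE_SPACING - 26)
--     return None
-- ===== Notes on version B (the rewrite author's own statement) =====
-- stated objective: simpler
-- what changed: Replaced the nested accumulating loops over range(1,6) with a single range check and a closed-form arithmetic expression for the pixel pair.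
import Mathlib
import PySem

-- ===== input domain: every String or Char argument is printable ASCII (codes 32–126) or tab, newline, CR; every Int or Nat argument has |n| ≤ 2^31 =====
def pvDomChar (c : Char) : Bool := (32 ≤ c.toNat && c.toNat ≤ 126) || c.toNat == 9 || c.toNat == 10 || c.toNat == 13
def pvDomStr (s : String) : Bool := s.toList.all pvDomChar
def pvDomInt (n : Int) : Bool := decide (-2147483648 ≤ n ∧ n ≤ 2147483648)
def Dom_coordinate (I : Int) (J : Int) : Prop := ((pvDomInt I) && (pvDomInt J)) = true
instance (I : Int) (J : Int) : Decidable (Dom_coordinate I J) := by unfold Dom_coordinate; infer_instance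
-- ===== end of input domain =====

-- B replaces A's nested accumulating loops with a range check and a closed-form pixel formula (simpler).


-- ===== PORT A =====
-- inner loop: for j in range(1,6): cumX += 92; if j-1 == J: return (cumX-26, y)
-- returns the updated cumX together with the (optional) result, so the fall-through state is kept
def coordinateInner (J : Int) (y : Int) : Int → List Int → Int × Option (Int × Int)
  | cumX, [] => (cumX, none)
  | cumX, j :: js =>
    let cumX' := cumX + 92
    if j - 1 = J then (cumX', some (cumX' - 26, y))
    else coordinateInner J y cumX' js

-- outer loop: for i in range(1,6): cumY += 92; if i-1 == I: y := cumY-26; inner loop; fall off → None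
def coordinateOuter (I : Int) (J : Int) : Int → Int → List Int → Option (Int × Int)
  | _, _, [] => none
  | cumY, cumX, i :: is =>
    let cumY' := cumY + 92
    if i - 1 = I then
      match coordinateInner J (cumY' - 26) cumX (PySem.List.pyRange 1 6 1) with
      | (_, some r) => some r
      | (cumX', none) => coordinateOuter I J cumY' cumX' is
    else coordinateOuter I J cumY' cumX is

def coordinate (I : Int) (J : Int) : Option (Int × Int) :=
  coordinateOuter I J 0 0 (PySem.List.pyRange 1 6 1)

-- ===== PORT B =====
def coordinate_alt (I : Int) (J : Int) : Option (Int × Int) :=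
  if 0 ≤ I ∧ I ≤ 4 ∧ 0 ≤ J ∧ J ≤ 4 then
    some ((J + 1) * 92 - 26, (I + 1) * 92 - 26)
  else none

-- ===== PRECONDITION & SPEC =====
def Spec_coordinate (I : Int) (J : Int) (out : Option (Int × Int)) : Prop := out = coordinate_alt I J
instance (I : Int) (J : Int) (out : Option (Int × Int)) : Decidable (Spec_coordinate I J out) := by unfold Spec_coordinate; infer_instance

-- ===== CLAIM (what is proved, stated in full; the proofs are below) =====
def Claim_equal_coordinate : Prop := ∀ (I : Int) (J : Int), Dom_coordinate I J → Spec_coordinate I J (coordinate I J)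

-- ===== LEMMAS AND PROOFS =====
theorem pyRange16 : PySem.List.pyRange 1 6 1 = [1, 2, 3, 4, 5] := by decide

theorem inner_in (J y cumX : Int) (h0 : 0 ≤ J) (h4 : J ≤ 4) :
    coordinateInner J y cumX [1, 2, 3, 4, 5] =
      (cumX + (J + 1) * 92, some (cumX + (J + 1) * 92 - 26, y)) := by
  simp only [coordinateInner]
  split_ifs <;> simp_all <;> omega

theorem inner_out (J y cumX : Int) (h : ¬ (0 ≤ J ∧ J ≤ 4)) :
    coordinateInner J y cumX [1, 2, 3, 4, 5] = (cumX + 460, none) := by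
  simp only [coordinateInner]
  split_ifs <;> first | omega | (refine Prod.ext ?_ rfl; omega) | norm_num

-- ===== VERDICT (by name: the statement is the Claim_ definition above) =====
theorem coordinate_spec : Claim_equal_coordinate := by
  intro I J _
  unfold Spec_coordinate coordinate coordinate_alt
  rw [pyRange16]
  by_cases hJ : 0 ≤ J ∧ J ≤ 4
  · simp only [coordinateOuter, pyRange16, inner_in J _ _ hJ.1 hJ.2]
    split_ifs <;> simp_all <;> omega
  · rw [if_neg (by tauto)]
    simp only [coordinateOuter, pyRange16, inner_out J _ _ hJ]
    split_ifs <;> rfl
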